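-- pv_equiv track=rewrite | github.com/RodMajors/ESOCN | scripts/JSONtoDATABASES.py | get_power_type_values
-- ===== SOURCE A (Python) =====
-- def get_power_type_values(power_types):
--     """从 powerTypes 数组提取 magickaCost, staminaCost, healthCost"""
--     magicka_cost = 0
--     stamina_cost = 0
--     health_cost = 0
--     if isinstance(power_types, list):
--         for pt in power_types:
--             if isinstance(pt, dict):
--                 magicka_cost = pt.get('magickaCost', magicka_cost)
--                 stamina_cost = pt.get('staminaCost', stamina_cost)
--                 health_cost = pt.get('healthCost', health_cost)
--     return magicka_cost, stamina_cost, health_cost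
-- ===== SOURCE B (Python) =====
-- def get_power_type_values(power_types):
--     """从 powerTypes 数组提取 magickaCost, staminaCost, healthCost"""
--     dicts = [pt for pt in power_types if isinstance(pt, dict)] if isinstance(power_types, list) else []
--     def last_cost(key):
--         return next((d[key] for d in reversed(dicts) if key in d), 0)
--     return last_cost('magickaCost'), last_cost('staminaCost'), last_cost('healthCost')
-- ===== Notes on version B (the rewrite author's own statement) =====
-- stated objective: idiomatic
-- what changed: Replaces the single fused loop that threads three accumulators through every dict with a filter plus three independent reversed scans, each taking the last occurrence of its key via next(...)/reversed with default 0.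
import Mathlib
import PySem

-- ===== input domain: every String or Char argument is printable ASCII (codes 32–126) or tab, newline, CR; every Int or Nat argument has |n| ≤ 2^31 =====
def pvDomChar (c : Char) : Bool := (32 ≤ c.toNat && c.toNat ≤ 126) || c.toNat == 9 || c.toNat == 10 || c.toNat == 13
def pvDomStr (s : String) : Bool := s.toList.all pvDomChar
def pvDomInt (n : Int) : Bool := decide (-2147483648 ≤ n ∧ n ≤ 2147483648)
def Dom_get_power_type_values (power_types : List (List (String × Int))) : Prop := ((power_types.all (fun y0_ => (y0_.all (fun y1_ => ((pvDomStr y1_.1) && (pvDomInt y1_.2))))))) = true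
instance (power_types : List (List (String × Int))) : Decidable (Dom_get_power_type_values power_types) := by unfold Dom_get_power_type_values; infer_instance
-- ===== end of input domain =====

-- B replaces A's single fused accumulating loop with a filter plus three independent
-- reversed last-occurrence scans (more idiomatic decomposition; same cost).


-- ===== PORT A =====
-- pt.get(k, dflt): first match in the association list, else the default
def pvDictGetD (d : List (String × Int)) (k : String) (dflt : Int) : Int :=
  match d.find? (fun p => p.1 == k) with
  | some p => p.2
  | none => dflt

def get_power_type_values (power_types : List (List (String × Int))) : Int × Int × Int :=
  power_types.foldl
    (fun acc pt =>
      (pvDictGetD pt "magickaCost" acc.1,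
       pvDictGetD pt "staminaCost" acc.2.1,
       pvDictGetD pt "healthCost" acc.2.2))
    (0, 0, 0)

-- ===== PORT B =====
-- 'key in d'
def pvContainsKey (d : List (String × Int)) (k : String) : Bool :=
  d.any (fun p => p.1 == k)

-- d[key] (key known present; 0 unreachable default)
def pvGetKey (d : List (String × Int)) (k : String) : Int :=
  ((d.find? (fun p => p.1 == k)).map (·.2)).getD 0

-- next((d[key] for d in reversed(dicts) if key in d), 0)
def pvLastCost (dicts : List (List (String × Int))) (k : String) : Int :=
  match dicts.reverse.find? (fun d => pvContainsKey d k) with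
  | some d => pvGetKey d k
  | none => 0

def get_power_type_values_alt (power_types : List (List (String × Int))) : Int × Int × Int :=
  (pvLastCost power_types "magickaCost",
   pvLastCost power_types "staminaCost",
   pvLastCost power_types "healthCost")

-- ===== PRECONDITION & SPEC =====
def Spec_get_power_type_values (power_types : List (List (String × Int))) (out : Int × Int × Int) : Prop := out = get_power_type_values_alt power_types
instance (power_types : List (List (String × Int))) (out : Int × Int × Int) : Decidable (Spec_get_power_type_values power_types out) := by unfold Spec_get_power_type_values; infer_instance

-- ===== CLAIM (what is proved, stated in full; the proofs are below) =====
def Claim_equal_get_power_type_values : Prop := ∀ (power_types : List (List (String × Int))), Dom_get_power_type_values power_types → Spec_get_power_type_values power_types (get_power_type_values power_types)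

-- ===== LEMMAS AND PROOFS =====

theorem pvDictGetD_of_contains (d : List (String × Int)) (k : String) (a : Int)
    (h : pvContainsKey d k = true) : pvDictGetD d k a = pvGetKey d k := by
  unfold pvDictGetD pvGetKey pvContainsKey at *
  have hs : (d.find? (fun p => p.1 == k)).isSome := by
    rw [List.find?_isSome]
    obtain ⟨p, hp, he⟩ := List.any_eq_true.mp h
    exact ⟨p, hp, he⟩
  obtain ⟨p, hp⟩ := Option.isSome_iff_exists.mp hs
  simp [hp]

theorem pvDictGetD_of_not_contains (d : List (String × Int)) (k : String) (a : Int)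
    (h : pvContainsKey d k = false) : pvDictGetD d k a = a := by
  unfold pvDictGetD pvContainsKey at *
  have : d.find? (fun p => p.1 == k) = none := by
    rw [List.find?_eq_none]
    intro x hx
    simpa using (List.any_eq_false.mp h) x hx
  simp [this]

theorem foldl_getD_eq_lastCost (k : String) (l : List (List (String × Int))) (a : Int) :
    l.foldl (fun a d => pvDictGetD d k a) a =
      (match l.reverse.find? (fun d => pvContainsKey d k) with
       | some d => pvGetKey d k
       | none => a) := by
  induction l generalizing a with
  | nil => simp
  | cons pt l ih =>
    rw [List.foldl_cons, ih, List.reverse_cons, List.find?_append]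
    cases h : l.reverse.find? (fun d => pvContainsKey d k) with
    | some d => simp
    | none =>
      cases hc : pvContainsKey pt k with
      | true => simp [hc, pvDictGetD_of_contains pt k a hc]
      | false => simp [hc, pvDictGetD_of_not_contains pt k a hc]

theorem fold_split (l : List (List (String × Int))) (m s h : Int) :
    l.foldl
      (fun acc pt =>
        (pvDictGetD pt "magickaCost" acc.1,
         pvDictGetD pt "staminaCost" acc.2.1,
         pvDictGetD pt "healthCost" acc.2.2)) (m, s, h)
    = (l.foldl (fun a d => pvDictGetD d "magickaCost" a) m,
       l.foldl (fun a d => pvDictGetD d "staminaCost" a) s,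
       l.foldl (fun a d => pvDictGetD d "healthCost" a) h) := by
  induction l generalizing m s h with
  | nil => rfl
  | cons pt l ih => simp [List.foldl_cons, ih]

-- ===== VERDICT (by name: the statement is the Claim_ definition above) =====
theorem get_power_type_values_spec : Claim_equal_get_power_type_values := by
  intro pts _
  unfold Spec_get_power_type_values get_power_type_values get_power_type_values_alt pvLastCost
  rw [fold_split, foldl_getD_eq_lastCost, foldl_getD_eq_lastCost, foldl_getD_eq_lastCost]
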